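-- pv_equiv track=rewrite | github.com/ehauckdo/UrbanSettlementGenerator | MountainFilter.py | adjustMatrix
-- ===== SOURCE A (Python) =====
-- def adjustMatrix(matrix, h):
-- 	drop = h
--
-- 	for top_height in range(h, len(matrix)):
-- 		for current_h in range(top_height, top_height-drop, -1):
-- 			for x in range(len(matrix[current_h])):
-- 				for z in range(len(matrix[current_h][x])):
-- 					matrix[current_h-1][x][z]= matrix[current_h][x][z]
-- 					matrix[current_h][x][z] = 0
-- 	return matrix
-- ===== SOURCE B (Python) =====
-- def adjustMatrix(matrix, h):
--     # Single pass: layer i takes the original layer i+h, zero layers on top.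
--     # Shift amounts outside (0, len(matrix)) leave the matrix unchanged,
--     # matching the loop bounds of the original.
--     L = len(matrix)
--     if 0 < h < L:
--         return [matrix[i + h] if i + h < L else [[0] * len(row) for row in matrix[i]]
--                 for i in range(L)]
--     return matrix
-- ===== Notes on version B (the rewrite author's own statement) =====
-- stated objective: alternative
-- what changed: Replaces the in-place cascade (each layer bubbled down one step at a time through h element-by-element moves) by a single pass that builds the result list directly: layer i = original layer i+h, zero layers on top.
-- outside the precondition, e.g. on adjustMatrix([[[1], [9]], [[2]]], 1): A returns [[[2], [9]], [[0]]], B returns [[[2]], [[0]]]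
import Mathlib
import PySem

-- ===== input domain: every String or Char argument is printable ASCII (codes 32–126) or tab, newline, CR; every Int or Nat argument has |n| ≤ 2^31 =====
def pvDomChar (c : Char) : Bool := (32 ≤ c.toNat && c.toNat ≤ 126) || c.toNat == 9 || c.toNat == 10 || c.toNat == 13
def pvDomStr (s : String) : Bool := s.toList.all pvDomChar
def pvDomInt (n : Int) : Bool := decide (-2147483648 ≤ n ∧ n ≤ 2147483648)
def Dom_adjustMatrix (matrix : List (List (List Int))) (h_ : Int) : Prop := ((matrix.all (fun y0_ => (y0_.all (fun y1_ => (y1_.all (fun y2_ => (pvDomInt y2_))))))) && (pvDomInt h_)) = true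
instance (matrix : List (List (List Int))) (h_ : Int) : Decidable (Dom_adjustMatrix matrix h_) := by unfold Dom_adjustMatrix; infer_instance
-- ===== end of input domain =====

-- B replaces A's quadratic in-place cascade by one pass building the shifted matrix directly.
-- Equivalence is about the RETURN value: A mutates its argument in place, B does not.

-- ===== PORT A =====
-- one Python loop body: matrix[current_h-1][x][z] = matrix[current_h][x][z]; matrix[current_h][x][z] = 0.
-- Indices are in range whenever the Python runs without IndexError (guaranteed under Pre_);
-- List.set/getD out of range are no-ops exactly where Python would raise (excluded by Pre_).
-- current_h ≥ 1 whenever this body runs, so the Nat subtraction c - 1 is exact.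
def pvStepZ (c x : Nat) (m : List (List (List Int))) (z : Nat) : List (List (List Int)) :=
  let v := ((m.getD c []).getD x []).getD z 0
  let m1 := m.set (c - 1) ((m.getD (c - 1) []).set x (((m.getD (c - 1) []).getD x []).set z v))
  m1.set c ((m1.getD c []).set x (((m1.getD c []).getD x []).set z 0))

def adjustMatrix (matrix : List (List (List Int))) (h_ : Int) : List (List (List Int)) :=
  (PySem.List.pyRange h_ (matrix.length : Int) 1).foldl (fun m t =>
    (PySem.List.pyRange t (t - h_) (-1)).foldl (fun m ch =>
      (List.range (m.getD ch.toNat []).length).foldl (fun m x =>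
        (List.range ((m.getD ch.toNat []).getD x []).length).foldl (pvStepZ ch.toNat x) m) m) m) matrix

-- ===== PORT B =====
def pvZeroLayer (layer : List (List Int)) : List (List Int) :=
  layer.map (fun row => row.map (fun _ => (0 : Int)))

def adjustMatrix_alt (matrix : List (List (List Int))) (h_ : Int) : List (List (List Int)) :=
  if 0 < h_ ∧ h_ < (matrix.length : Int) then
    (List.range matrix.length).map (fun i =>
      if i + h_.toNat < matrix.length then matrix.getD (i + h_.toNat) []
      else pvZeroLayer (matrix.getD i []))
  else matrix

-- ===== PRECONDITION & SPEC =====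
-- Pre_ restricts shifts that actually move layers (0 < h_ < len) to matrices whose layers all share
-- one shape (the natural domain: a 3D height map). On ragged matrices A either raises IndexError or
-- leaves stray elements of partially overwritten layers behind, an artefact of the in-place cascade.
def Pre_adjustMatrix (matrix : List (List (List Int))) (h_ : Int) : Prop :=
  h_ ≤ 0 ∨ (matrix.length : Int) ≤ h_ ∨
    ∀ l ∈ matrix, l.map List.length = (matrix.headD []).map List.length
instance (matrix : List (List (List Int))) (h_ : Int) : Decidable (Pre_adjustMatrix matrix h_) := by
  unfold Pre_adjustMatrix; infer_instance

def pvWitness_adjustMatrix : List (List (List Int)) × Int := ([[[1, 2]], [[3, 4]]], 1)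

def Spec_adjustMatrix (matrix : List (List (List Int))) (h_ : Int) (out : List (List (List Int))) : Prop := out = adjustMatrix_alt matrix h_
instance (matrix : List (List (List Int))) (h_ : Int) (out : List (List (List Int))) : Decidable (Spec_adjustMatrix matrix h_ out) := by unfold Spec_adjustMatrix; infer_instance

-- ===== CLAIM (what is proved, stated in full; the proofs are below) =====
def Claim_equal_adjustMatrix : Prop := ∀ (matrix : List (List (List Int))) (h_ : Int), Dom_adjustMatrix matrix h_ → Pre_adjustMatrix matrix h_ → Spec_adjustMatrix matrix h_ (adjustMatrix matrix h_)

-- ===== LEMMAS AND PROOFS =====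

-- zero layer depends only on the shape
theorem pvZeroLayer_eq_map_shape (a : List (List Int)) :
    pvZeroLayer a = (a.map List.length).map (fun n => List.replicate n (0 : Int)) := by
  simp [pvZeroLayer, List.map_map, Function.comp_def, List.map_const']

theorem pvZeroLayer_eq_of_shape (a b : List (List Int))
    (h : a.map List.length = b.map List.length) : pvZeroLayer a = pvZeroLayer b := by
  rw [pvZeroLayer_eq_map_shape, pvZeroLayer_eq_map_shape, h]

-- getD/set micro-lemmas
theorem pv_getD_set_self {α : Type} (l : List α) (i : Nat) (v d : α) (h : i < l.length) :
    (l.set i v).getD i d = v := by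
  simp [List.getD_eq_getElem?_getD, h]

theorem pv_getD_set_ne {α : Type} (l : List α) (i j : Nat) (v d : α) (h : i ≠ j) :
    (l.set i v).getD j d = l.getD j d := by
  simp [List.getD_eq_getElem?_getD, h]

theorem pv_set_getD_self {α : Type} (l : List α) (i : Nat) (d : α) (h : i < l.length) :
    l.set i (l.getD i d) = l := by
  simp [h]

theorem pv_getD_append {α : Type} (a b : List α) (d : α) :
    (a ++ b).getD a.length d = b.getD 0 d := by
  simp [List.getD_eq_getElem?_getD, List.getElem?_append_right]

-- a list is recovered from getD over its range
theorem map_getD_range_self {α : Type} (l : List α) (d : α) :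
    (List.range l.length).map (fun i => l.getD i d) = l := by
  apply List.ext_getElem (by simp)
  intro i h1 h2
  simp [List.getD_eq_getElem?_getD, List.getElem?_eq_getElem h2]

-- middle-point set: copying element k of a into take k a ++ drop k b
theorem pv_set_mid {α : Type} (a b : List α) (k : Nat) (d : α)
    (ha : k < a.length) (hb : k < b.length) :
    (a.take k ++ b.drop k).set k (a.getD k d) = a.take (k + 1) ++ b.drop (k + 1) := by
  have hlt : ¬ k < (a.take k).length := by simp [Nat.min_eq_left (Nat.le_of_lt ha)]
  rw [List.set_append, if_neg hlt]
  have h1 : (a.take k).length = k := by simp [Nat.min_eq_left (Nat.le_of_lt ha)]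
  rw [h1, Nat.sub_self, List.drop_eq_getElem_cons hb, List.set_cons_zero]
  have h2 : a.take (k + 1) = a.take k ++ [a[k]] := by
    rw [List.take_add_one, List.getElem?_eq_getElem ha]; rfl
  have h3 : a.getD k d = a[k] := List.getD_eq_getElem a d ha
  rw [h3, h2, List.append_assoc, List.singleton_append]

-- effect of one z-step on a doubly-set state
theorem pvStepZ_set (m : List (List (List Int))) (P Q : List (List Int)) (c x k : Nat)
    (hc1 : 1 ≤ c) (hcm : c < m.length) :
    pvStepZ c x ((m.set (c-1) P).set c Q) k =
      (m.set (c-1) (P.set x ((P.getD x []).set k ((Q.getD x []).getD k 0)))).set c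
        (Q.set x ((Q.getD x []).set k 0)) := by
  have hc1m : c - 1 < m.length := lt_of_le_of_lt (Nat.sub_le c 1) hcm
  have hne : c ≠ c - 1 := by omega
  simp only [pvStepZ]
  have e1 : ((m.set (c-1) P).set c Q).getD c [] = Q :=
    pv_getD_set_self _ c Q [] (by simpa using hcm)
  have e2 : ((m.set (c-1) P).set c Q).getD (c-1) [] = P := by
    rw [pv_getD_set_ne _ c (c-1) Q [] hne, pv_getD_set_self _ (c-1) P [] hc1m]
  rw [e1, e2]
  rw [List.set_comm Q (P.set x ((P.getD x []).set k ((Q.getD x []).getD k 0))) hne]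
  simp only [List.set_set]
  have e3 : ((m.set (c-1) (P.set x ((P.getD x []).set k ((Q.getD x []).getD k 0)))).set c Q).getD c [] = Q :=
    pv_getD_set_self _ c Q [] (by simpa using hcm)
  rw [e3]

-- z-loop characterisation
theorem pv_zfold (m : List (List (List Int))) (c x k : Nat)
    (hc1 : 1 ≤ c) (hcm : c < m.length)
    (hx : x < (m.getD c []).length) (hx' : x < (m.getD (c-1) []).length)
    (hlen : ((m.getD (c-1) []).getD x []).length = ((m.getD c []).getD x []).length)
    (hk : k ≤ ((m.getD c []).getD x []).length) :
    (List.range k).foldl (pvStepZ c x) m =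
      (m.set (c-1) ((m.getD (c-1) []).set x
          (((m.getD c []).getD x []).take k ++ ((m.getD (c-1) []).getD x []).drop k))).set c
        ((m.getD c []).set x
          (List.replicate k (0:Int) ++ ((m.getD c []).getD x []).drop k)) := by
  have hc1m : c - 1 < m.length := lt_of_le_of_lt (Nat.sub_le c 1) hcm
  induction k with
  | zero =>
    simp only [List.range_zero, List.foldl_nil, List.take_zero, List.nil_append,
      List.drop_zero, List.replicate_zero]
    rw [pv_set_getD_self _ x [] hx', pv_set_getD_self _ x [] hx,
      pv_set_getD_self m (c-1) [] hc1m, pv_set_getD_self m c [] hcm]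
  | succ k ih =>
    have hkn : k < ((m.getD c []).getD x []).length := hk
    rw [List.range_succ, List.foldl_append, ih (Nat.le_of_lt hkn), List.foldl_cons, List.foldl_nil]
    rw [pvStepZ_set m _ _ c x k hc1 hcm]
    have r1 : ((m.getD (c-1) []).set x (((m.getD c []).getD x []).take k ++ ((m.getD (c-1) []).getD x []).drop k)).getD x []
        = ((m.getD c []).getD x []).take k ++ ((m.getD (c-1) []).getD x []).drop k :=
      pv_getD_set_self _ x _ [] hx'
    have r2 : ((m.getD c []).set x (List.replicate k (0:Int) ++ ((m.getD c []).getD x []).drop k)).getD x []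
        = List.replicate k (0:Int) ++ ((m.getD c []).getD x []).drop k :=
      pv_getD_set_self _ x _ [] hx
    rw [r1, r2, List.set_set, List.set_set]
    have e3 : (List.replicate k (0:Int) ++ ((m.getD c []).getD x []).drop k).getD k 0
        = ((m.getD c []).getD x []).getD k 0 := by
      have h0 := pv_getD_append (List.replicate k (0:Int)) (((m.getD c []).getD x []).drop k) 0
      simp only [List.length_replicate] at h0
      rw [h0, List.drop_eq_getElem_cons hkn, List.getD_cons_zero,
        List.getD_eq_getElem _ _ hkn]
    rw [e3]
    have e6 : (((m.getD c []).getD x []).take k ++ ((m.getD (c-1) []).getD x []).drop k).set k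
          (((m.getD c []).getD x []).getD k 0)
        = ((m.getD c []).getD x []).take (k+1) ++ ((m.getD (c-1) []).getD x []).drop (k+1) :=
      pv_set_mid _ _ k 0 hkn (hlen ▸ hkn)
    rw [e6]
    have hget : (List.replicate (((m.getD c []).getD x []).length) (0:Int)).getD k 0 = 0 := by
      rw [List.getD_eq_getElem?_getD, List.getElem?_replicate, if_pos hkn]; rfl
    have e8 : (List.replicate k (0:Int) ++ ((m.getD c []).getD x []).drop k).set k 0
        = List.replicate (k+1) (0:Int) ++ ((m.getD c []).getD x []).drop (k+1) := by
      have h := pv_set_mid (List.replicate (((m.getD c []).getD x []).length) (0:Int))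
        ((m.getD c []).getD x []) k 0 (by simpa using hkn) hkn
      rw [List.take_replicate, Nat.min_eq_left (Nat.le_of_lt hkn), List.take_replicate,
        Nat.min_eq_left hkn, hget] at h
      exact h
    rw [e8]

-- x-loop characterisation
theorem pv_xfold (m : List (List (List Int))) (c k : Nat)
    (hc1 : 1 ≤ c) (hcm : c < m.length)
    (hshape : (m.getD (c-1) []).map List.length = (m.getD c []).map List.length)
    (hk : k ≤ (m.getD c []).length) :
    (List.range k).foldl (fun m' x =>
        (List.range ((m'.getD c []).getD x []).length).foldl (pvStepZ c x) m') m =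
      (m.set (c-1) ((m.getD c []).take k ++ (m.getD (c-1) []).drop k)).set c
        (pvZeroLayer ((m.getD c []).take k) ++ (m.getD c []).drop k) := by
  have hc1m : c - 1 < m.length := lt_of_le_of_lt (Nat.sub_le c 1) hcm
  have hne : c ≠ c - 1 := by omega
  have hLowLen : (m.getD (c-1) []).length = (m.getD c []).length := by
    have := congrArg List.length hshape; simpa using this
  induction k with
  | zero =>
    simp only [List.range_zero, List.foldl_nil, List.take_zero, List.nil_append,
      List.drop_zero]
    have : pvZeroLayer ([] : List (List Int)) = [] := by simp [pvZeroLayer]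
    rw [this, List.nil_append, pv_set_getD_self m (c-1) [] hc1m, pv_set_getD_self m c [] hcm]
  | succ k ih =>
    have hkU : k < (m.getD c []).length := hk
    have hkL : k < (m.getD (c-1) []).length := by omega
    rw [List.range_succ, List.foldl_append, ih (Nat.le_of_lt hkU), List.foldl_cons, List.foldl_nil]
    have hzk : (pvZeroLayer ((m.getD c []).take k)).length = k := by
      simp only [pvZeroLayer, List.length_map, List.length_take]
      exact Nat.min_eq_left (Nat.le_of_lt hkU)
    have hBlen : (pvZeroLayer ((m.getD c []).take k) ++ (m.getD c []).drop k).length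
        = (m.getD c []).length := by
      simp only [List.length_append, hzk, List.length_drop]; omega
    have hAlen : ((m.getD c []).take k ++ (m.getD (c-1) []).drop k).length
        = (m.getD c []).length := by
      simp only [List.length_append, List.length_take, List.length_drop,
        Nat.min_eq_left (Nat.le_of_lt hkU)]; omega
    have g1 : ((m.set (c-1) ((m.getD c []).take k ++ (m.getD (c-1) []).drop k)).set c
          (pvZeroLayer ((m.getD c []).take k) ++ (m.getD c []).drop k)).getD c []
        = pvZeroLayer ((m.getD c []).take k) ++ (m.getD c []).drop k :=
      pv_getD_set_self _ c _ [] (by simpa using hcm)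
    have g4 : ((m.set (c-1) ((m.getD c []).take k ++ (m.getD (c-1) []).drop k)).set c
          (pvZeroLayer ((m.getD c []).take k) ++ (m.getD c []).drop k)).getD (c-1) []
        = (m.getD c []).take k ++ (m.getD (c-1) []).drop k := by
      rw [pv_getD_set_ne _ c (c-1) _ [] hne, pv_getD_set_self _ (c-1) _ [] hc1m]
    have g2 : (pvZeroLayer ((m.getD c []).take k) ++ (m.getD c []).drop k).getD k []
        = (m.getD c []).getD k [] := by
      have h0 := pv_getD_append (pvZeroLayer ((m.getD c []).take k)) ((m.getD c []).drop k) []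
      rw [hzk] at h0
      rw [h0, List.drop_eq_getElem_cons hkU, List.getD_cons_zero, List.getD_eq_getElem _ _ hkU]
    have g5 : ((m.getD c []).take k ++ (m.getD (c-1) []).drop k).getD k []
        = (m.getD (c-1) []).getD k [] := by
      have h0 := pv_getD_append ((m.getD c []).take k) ((m.getD (c-1) []).drop k) []
      rw [List.length_take, Nat.min_eq_left (Nat.le_of_lt hkU)] at h0
      rw [h0, List.drop_eq_getElem_cons hkL, List.getD_cons_zero, List.getD_eq_getElem _ _ hkL]
    have hrow : ((m.getD (c-1) []).getD k []).length = ((m.getD c []).getD k []).length := by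
      have h1 := List.getElem_of_eq hshape (by simpa using hkL)
      rw [List.getElem_map, List.getElem_map] at h1
      rw [List.getD_eq_getElem _ _ hkL, List.getD_eq_getElem _ _ hkU]
      exact h1
    -- apply the z-loop characterisation at row k, over the whole row
    rw [pv_zfold _ c k _ hc1 (by simpa using hcm)
      (by rw [g1, hBlen]; exact hkU) (by rw [g4, hAlen]; exact hkU)
      (by rw [g1, g4, g2, g5]; exact hrow) (le_refl _)]
    rw [g1, g2, g4, g5]
    rw [List.take_length, List.drop_length]
    have hdrop : ((m.getD (c-1) []).getD k []).drop ((m.getD c []).getD k []).length = [] := by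
      rw [← hrow, List.drop_length]
    rw [hdrop, List.append_nil, List.append_nil]
    rw [List.set_comm (pvZeroLayer ((m.getD c []).take k) ++ (m.getD c []).drop k)
      (((m.getD c []).take k ++ (m.getD (c-1) []).drop k).set k ((m.getD c []).getD k [])) hne]
    simp only [List.set_set]
    have e6 : ((m.getD c []).take k ++ (m.getD (c-1) []).drop k).set k ((m.getD c []).getD k [])
        = (m.getD c []).take (k+1) ++ (m.getD (c-1) []).drop (k+1) :=
      pv_set_mid _ _ k [] hkU hkL
    have hzl_take : ∀ j : Nat, pvZeroLayer ((m.getD c []).take j) = (pvZeroLayer (m.getD c [])).take j := by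
      intro j; simp [pvZeroLayer, List.map_take]
    have hzl_getD : (pvZeroLayer (m.getD c [])).getD k []
        = List.replicate (((m.getD c []).getD k []).length) (0:Int) := by
      rw [List.getD_eq_getElem _ _ (by simp only [pvZeroLayer, List.length_map]; exact hkU)]
      simp only [pvZeroLayer, List.getElem_map, List.map_const']
      rw [List.getD_eq_getElem _ _ hkU]
    have e8 : (pvZeroLayer ((m.getD c []).take k) ++ (m.getD c []).drop k).set k
          (List.replicate (((m.getD c []).getD k []).length) (0:Int))
        = pvZeroLayer ((m.getD c []).take (k+1)) ++ (m.getD c []).drop (k+1) := by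
      have h := pv_set_mid (pvZeroLayer (m.getD c [])) (m.getD c []) k []
        (by simp only [pvZeroLayer, List.length_map]; exact hkU) hkU
      rw [hzl_getD] at h
      rw [hzl_take k, hzl_take (k+1)]
      exact h
    rw [e6, e8]

-- full x-loop: move layer c down onto layer c-1 and zero layer c
theorem pv_move (m : List (List (List Int))) (c : Nat)
    (hc1 : 1 ≤ c) (hcm : c < m.length)
    (hshape : (m.getD (c-1) []).map List.length = (m.getD c []).map List.length) :
    (List.range (m.getD c []).length).foldl (fun m' x =>
        (List.range ((m'.getD c []).getD x []).length).foldl (pvStepZ c x) m') m =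
      (m.set (c-1) (m.getD c [])).set c (pvZeroLayer (m.getD c [])) := by
  have hLowLen : (m.getD (c-1) []).length = (m.getD c []).length := by
    have := congrArg List.length hshape; simpa using this
  rw [pv_xfold m c ((m.getD c []).length) hc1 hcm hshape (le_refl _)]
  rw [List.take_length, ← hLowLen, List.drop_length, List.append_nil,
    hLowLen, List.drop_length, List.append_nil]

-- result of one cascade (one outer iteration): layer a := layer c, zero layers a+1..c
def pvCasc (m : List (List (List Int))) (a c : Nat) : List (List (List Int)) :=
  (List.range m.length).map (fun i =>
    if i = a then m.getD c []
    else if a < i ∧ i ≤ c then pvZeroLayer (m.getD i [])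
    else m.getD i [])

def pvUniform (m : List (List (List Int))) (S : List Nat) : Prop :=
  ∀ l ∈ m, l.map List.length = S

theorem pv_zl_shape (l : List (List Int)) :
    (pvZeroLayer l).map List.length = l.map List.length := by
  simp [pvZeroLayer, List.map_map, Function.comp_def]

theorem pv_uniform_getD {m : List (List (List Int))} {S : List Nat} (h : pvUniform m S)
    {i : Nat} (hi : i < m.length) : (m.getD i []).map List.length = S := by
  apply h
  rw [List.getD_eq_getElem _ _ hi]
  exact List.getElem_mem _

theorem pv_cascade (S : List Nat) (k : Nat) :
    ∀ (m : List (List (List Int))) (a c : Nat), pvUniform m S → a + k = c → c < m.length →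
    (PySem.List.pyRange (c : Int) (a : Int) (-1)).foldl (fun m' ch =>
        (List.range (m'.getD ch.toNat []).length).foldl (fun m'' x =>
          (List.range ((m''.getD ch.toNat []).getD x []).length).foldl (pvStepZ ch.toNat x) m'') m') m =
      pvCasc m a c := by
  induction k with
  | zero =>
    intro m a c hu hac hcm
    have hca : c = a := by omega
    subst hca
    rw [PySem.List.pyRange_neg_one_eq_nil (le_refl _)]
    simp only [List.foldl_nil]
    unfold pvCasc
    rw [List.map_congr_left (g := fun i => m.getD i []) ?_, map_getD_range_self]
    intro i _
    split_ifs with h1 h2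
    · rw [h1]
    · omega
    · rfl
  | succ k ih =>
    intro m a c hu hac hcm
    have hac' : a < c := by omega
    have hc1 : 1 ≤ c := by omega
    have hc1m : c - 1 < m.length := by omega
    have hshape_c : (m.getD (c-1) []).map List.length = (m.getD c []).map List.length := by
      rw [pv_uniform_getD hu hc1m, pv_uniform_getD hu hcm]
    rw [PySem.List.pyRange_neg_one_cons (by exact_mod_cast hac')]
    simp only [List.foldl_cons, Int.toNat_natCast]
    rw [pv_move m c hc1 hcm hshape_c]
    have hcast : (c : Int) - 1 = ((c - 1 : Nat) : Int) := by omega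
    rw [hcast]
    have hu' : pvUniform ((m.set (c-1) (m.getD c [])).set c (pvZeroLayer (m.getD c []))) S := by
      intro l hl
      rcases List.mem_or_eq_of_mem_set hl with hl' | rfl
      · rcases List.mem_or_eq_of_mem_set hl' with hl'' | rfl
        · exact hu _ hl''
        · exact hu _ (by rw [List.getD_eq_getElem _ _ hcm]; exact List.getElem_mem _)
      · rw [pv_zl_shape]
        exact hu _ (by rw [List.getD_eq_getElem _ _ hcm]; exact List.getElem_mem _)
    rw [ih _ a (c-1) hu' (by omega) (by simpa using hc1m)]
    -- transfer the cascade description back to the original state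
    unfold pvCasc
    have hlen : ((m.set (c-1) (m.getD c [])).set c (pvZeroLayer (m.getD c []))).length = m.length := by
      simp
    rw [hlen]
    apply List.map_congr_left
    intro i hi
    have him : i < m.length := List.mem_range.mp hi
    have g0 : ∀ j : Nat, j ≠ c - 1 → j ≠ c →
        ((m.set (c-1) (m.getD c [])).set c (pvZeroLayer (m.getD c []))).getD j [] = m.getD j [] := by
      intro j h1 h2
      rw [pv_getD_set_ne _ c j _ [] (fun h => h2 h.symm), pv_getD_set_ne _ (c-1) j _ [] (fun h => h1 h.symm)]
    have gc1 : ((m.set (c-1) (m.getD c [])).set c (pvZeroLayer (m.getD c []))).getD (c-1) [] = m.getD c [] := by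
      rw [pv_getD_set_ne _ c (c-1) _ [] (by omega), pv_getD_set_self _ (c-1) _ [] hc1m]
    have gc : ((m.set (c-1) (m.getD c [])).set c (pvZeroLayer (m.getD c []))).getD c [] = pvZeroLayer (m.getD c []) := by
      rw [pv_getD_set_self _ c _ [] (by simpa using hcm)]
    by_cases h1 : i = a
    · rw [if_pos h1, if_pos h1]
      exact gc1
    · rw [if_neg h1, if_neg h1]
      by_cases h2 : a < i ∧ i ≤ c - 1
      · rw [if_pos h2, if_pos (by omega : a < i ∧ i ≤ c)]
        by_cases h3 : i = c - 1
        · rw [h3, gc1]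
          exact pvZeroLayer_eq_of_shape _ _ (by rw [pv_uniform_getD hu hcm, pv_uniform_getD hu hc1m])
        · rw [g0 i (by omega) (by omega)]
      · rw [if_neg h2]
        by_cases h3 : i = c
        · rw [if_pos (by omega : a < i ∧ i ≤ c), h3, gc]
        · rw [if_neg (by omega : ¬ (a < i ∧ i ≤ c)), g0 i (by omega) h3]

-- state after the outer loop has processed top heights h .. t-1  (t ≥ h+1)
def pvSt (orig : List (List (List Int))) (hN t : Nat) : List (List (List Int)) :=
  (List.range orig.length).map (fun i =>
    if i + hN < t then orig.getD (i + hN) []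
    else if i < t then pvZeroLayer (orig.getD i [])
    else orig.getD i [])

theorem pv_getD_map_range {α : Type} (f : Nat → α) (n i : Nat) (d : α) (h : i < n) :
    ((List.range n).map f).getD i d = f i := by
  rw [List.getD_eq_getElem _ _ (by simpa using h)]
  simp

theorem pv_zl_idem (l : List (List Int)) :
    pvZeroLayer (pvZeroLayer l) = pvZeroLayer l := by
  simp [pvZeroLayer, List.map_map, Function.comp_def]

theorem pv_st_getD (orig : List (List (List Int))) (hN t i : Nat) (h : i < orig.length) :
    (pvSt orig hN t).getD i [] =
      (if i + hN < t then orig.getD (i + hN) []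
       else if i < t then pvZeroLayer (orig.getD i []) else orig.getD i []) := by
  unfold pvSt
  exact pv_getD_map_range _ _ _ _ h

theorem pv_st_uniform (orig : List (List (List Int))) (S : List Nat) (hN t : Nat)
    (hu : pvUniform orig S) (ht : t ≤ orig.length) : pvUniform (pvSt orig hN t) S := by
  intro l hl
  unfold pvSt at hl
  rcases List.mem_map.mp hl with ⟨i, hi, rfl⟩
  have him : i < orig.length := List.mem_range.mp hi
  split_ifs with h1 h2
  · exact pv_uniform_getD hu (by omega)
  · rw [pv_zl_shape]
    exact pv_uniform_getD hu him
  · exact pv_uniform_getD hu him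

-- one cascade advances the outer-loop state by one top height
theorem pv_casc_st (orig : List (List (List Int))) (hN t : Nat)
    (hle : hN ≤ t) (hlt : t < orig.length) :
    pvCasc (pvSt orig hN t) (t - hN) t = pvSt orig hN (t + 1) := by
  apply List.ext_getElem (by simp [pvCasc, pvSt])
  intro i hi1 hi2
  have him : i < orig.length := by simpa [pvSt] using hi2
  simp only [pvCasc, List.getElem_map, List.getElem_range]
  rw [pv_st_getD orig hN t t hlt, pv_st_getD orig hN t i him]
  simp only [pvSt, List.getElem_map, List.getElem_range]
  split_ifs <;> first
    | rfl
    | omega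
    | (rw [pv_zl_idem])
    | (congr 1; omega)

-- the first cascade turns the original matrix into the state after top height hN
theorem pv_casc_start (orig : List (List (List Int))) (hN : Nat) :
    pvCasc orig 0 hN = pvSt orig hN (hN + 1) := by
  apply List.ext_getElem (by simp [pvCasc, pvSt])
  intro i hi1 hi2
  have him : i < orig.length := by simpa [pvSt] using hi2
  simp only [pvCasc, pvSt, List.getElem_map, List.getElem_range]
  split_ifs <;> first
    | rfl
    | omega
    | (congr 1; omega)

-- the tail of the outer loop, from top height t on
theorem pv_outer (orig : List (List (List Int))) (S : List Nat) (hN k : Nat) :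
    ∀ t : Nat, pvUniform orig S → 1 ≤ hN → hN ≤ t → t + k = orig.length →
    (PySem.List.pyRange (t : Int) (orig.length : Int) 1).foldl (fun m tt =>
      (PySem.List.pyRange tt (tt - (hN : Int)) (-1)).foldl (fun m ch =>
        (List.range (m.getD ch.toNat []).length).foldl (fun m x =>
          (List.range ((m.getD ch.toNat []).getD x []).length).foldl (pvStepZ ch.toNat x) m) m) m)
      (pvSt orig hN t) = pvSt orig hN orig.length := by
  induction k with
  | zero =>
    intro t hu h1 hle hts
    rw [PySem.List.pyRange_one_eq_nil (by omega)]
    simp only [List.foldl_nil]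
    rw [show t = orig.length from by omega]
  | succ k ih =>
    intro t hu h1 hle hts
    have htL : t < orig.length := by omega
    rw [PySem.List.pyRange_one_cons (by exact_mod_cast htL)]
    simp only [List.foldl_cons]
    rw [show (t : Int) - (hN : Int) = ((t - hN : Nat) : Int) from by omega]
    rw [pv_cascade S hN (pvSt orig hN t) (t - hN) t
      (pv_st_uniform orig S hN t hu (by omega)) (by omega) (by simp [pvSt]; omega)]
    rw [pv_casc_st orig hN t hle htL]
    rw [show (t : Int) + 1 = ((t + 1 : Nat) : Int) from by omega]
    exact ih (t + 1) hu h1 (by omega) (by omega)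

-- ===== VERDICT (by name: the statement is the Claim_ definition above) =====
theorem adjustMatrix_spec : Claim_equal_adjustMatrix := by
  intro matrix h_ _ hpre
  unfold Spec_adjustMatrix adjustMatrix adjustMatrix_alt
  by_cases hcond : 0 < h_ ∧ h_ < (matrix.length : Int)
  · rw [if_pos hcond]
    obtain ⟨h0, hL⟩ := hcond
    have hu : pvUniform matrix ((matrix.headD []).map List.length) := by
      rcases hpre with h | h | h
      · omega
      · omega
      · exact h
    have hh : h_ = (h_.toNat : Int) := (Int.toNat_of_nonneg (le_of_lt h0)).symm
    have h1 : 1 ≤ h_.toNat := by omega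
    have hNL : h_.toNat < matrix.length := by omega
    rw [hh]
    rw [PySem.List.pyRange_one_cons (by exact_mod_cast hNL)]
    simp only [List.foldl_cons]
    rw [show (h_.toNat : Int) - (h_.toNat : Int) = ((0 : Nat) : Int) from by omega]
    rw [pv_cascade ((matrix.headD []).map List.length) h_.toNat matrix 0 h_.toNat hu
      (by omega) hNL]
    rw [pv_casc_start matrix h_.toNat]
    rw [show (h_.toNat : Int) + 1 = ((h_.toNat + 1 : Nat) : Int) from by omega]
    rw [pv_outer matrix ((matrix.headD []).map List.length) h_.toNat
      (matrix.length - (h_.toNat + 1)) (h_.toNat + 1) hu h1 (by omega) (by omega)]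
    unfold pvSt
    apply List.map_congr_left
    intro i hi
    have him : i < matrix.length := List.mem_range.mp hi
    simp only [Int.toNat_natCast]
    split_ifs with hsh
    · rfl
    · rfl
  · rw [if_neg hcond]
    have hcase : h_ ≤ 0 ∨ (matrix.length : Int) ≤ h_ := by omega
    rcases hcase with hneg | hbig
    · have hid : ∀ (l : List Int) (m : List (List (List Int))),
          l.foldl (fun m tt =>
            (PySem.List.pyRange tt (tt - h_) (-1)).foldl (fun m ch =>
              (List.range (m.getD ch.toNat []).length).foldl (fun m x =>
                (List.range ((m.getD ch.toNat []).getD x []).length).foldl (pvStepZ ch.toNat x) m) m) m) m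
            = m := by
        intro l
        induction l with
        | nil => intro m; rfl
        | cons a l ihl =>
          intro m
          simp only [List.foldl_cons]
          rw [PySem.List.pyRange_neg_one_eq_nil (by omega)]
          simp only [List.foldl_nil]
          exact ihl m
      exact hid _ matrix
    · rw [PySem.List.pyRange_one_eq_nil (by exact_mod_cast hbig)]
      simp only [List.foldl_nil]
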